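-- pv_equiv track=rewrite | github.com/pankaj1707k/advent-of-code | 2024/day_10/part_1.py | search
-- ===== SOURCE A (Python) =====
-- def search(
--     row: int, col: int, grid: list[list[int]], visited: set[tuple[int, int]]
-- ) -> int:
--     if (row, col) in visited:
--         return 0
--     visited.add((row, col))
--     if grid[row][col] == 9:
--         return 1
--     score = 0
--     for dr, dc in [(-1, 0), (1, 0), (0, 1), (0, -1)]:
--         nr, nc = row + dr, col + dc
--         if nr < 0 or nc < 0 or nr >= len(grid) or nc >= len(grid[nr]):
--             continue
--         if grid[nr][nc] - grid[row][col] == 1: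
--             score += search(nr, nc, grid, visited)
--     return score
-- ===== SOURCE B (Python) =====
-- def search(
--     row: int, col: int, grid: list[list[int]], visited: set[tuple[int, int]]
-- ) -> int:
--     score = 0
--     stack = [(row, col)]
--     while stack:
--         r, c = stack.pop()
--         if (r, c) in visited:
--             continue
--         visited.add((r, c))
--         h = grid[r][c]
--         if h == 9:
--             score += 1
--             continue
--         # pushed so that pop order matches reading order of the four directions
--         for nr, nc in ((r, c - 1), (r, c + 1), (r + 1, c), (r - 1, c)):
--             if 0 <= nr < len(grid) and 0 <= nc < len(grid[nr]) and grid[nr][nc] - h == 1: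
--                 stack.append((nr, nc))
--     return score
-- ===== Notes on version B (the rewrite author's own statement) =====
-- stated objective: alternative
-- what changed: Replaces the recursive DFS (call stack, per-call neighbour loop with recursive score summation) by an iterative worklist traversal with an explicit stack and a single running score counter; Pre_ excludes only the inputs where A raises IndexError (start cell out of range and not already visited), where B raises too.
import Mathlib
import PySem

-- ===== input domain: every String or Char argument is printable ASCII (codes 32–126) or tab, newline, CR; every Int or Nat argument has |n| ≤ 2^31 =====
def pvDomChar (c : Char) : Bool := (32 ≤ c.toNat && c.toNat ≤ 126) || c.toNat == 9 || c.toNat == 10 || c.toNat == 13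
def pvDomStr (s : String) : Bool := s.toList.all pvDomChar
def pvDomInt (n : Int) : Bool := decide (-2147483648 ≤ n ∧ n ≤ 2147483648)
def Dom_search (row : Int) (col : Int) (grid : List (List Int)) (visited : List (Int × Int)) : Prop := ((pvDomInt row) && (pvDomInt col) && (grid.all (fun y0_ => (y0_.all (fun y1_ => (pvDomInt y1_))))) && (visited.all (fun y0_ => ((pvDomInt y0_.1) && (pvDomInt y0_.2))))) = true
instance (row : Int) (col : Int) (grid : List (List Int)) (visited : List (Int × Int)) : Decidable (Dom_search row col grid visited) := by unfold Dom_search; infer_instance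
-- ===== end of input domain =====

-- B rewrites A's recursive DFS as an iterative explicit-stack traversal (alternative decomposition,
-- same cost). Both mutate `visited` identically in Python; the equivalence proved here is about the
-- return value (the ports thread the set and return the score).

-- ===== PORT A =====
-- shared index helpers (exact Python indexing via PySem.List.pyGet?)
def pvCell (grid : List (List Int)) (r c : Int) : Option Int :=
  (PySem.List.pyGet? grid r).bind fun rw => PySem.List.pyGet? rw c

-- len(grid[r]) — used by both ports only after 0 ≤ r < len(grid) has been checked, where it is exact
def pvRowLen (grid : List (List Int)) (r : Int) : Int :=
  (((PySem.List.pyGet? grid r).getD []).length : Int)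

-- all in-bounds positions of the grid (used only to size the fuel; fuel is a totality guard, see below)
def pvAllCells (grid : List (List Int)) : List (Int × Int) :=
  (List.range grid.length).flatMap fun (i : Nat) =>
    (List.range (pvRowLen grid (i : Int)).toNat).map fun (j : Nat) => ((i : Int), (j : Int))

def pvDirs : List (Int × Int) := [(-1, 0), (1, 0), (0, 1), (0, -1)]

-- A's recursion, fuel-guarded for totality. The recursion depth is bounded by the number of
-- in-bounds cells + 2 (every call past the visited-check adds a fresh cell to `visited`, and only
-- the initial cell can be out of bounds), so fuel `pvFuelA` is never exhausted (proved below).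
def searchRec (grid : List (List Int)) : Nat → Int → Int → List (Int × Int) → Int × List (Int × Int)
  | 0, _, _, vis => (0, vis)
  | f + 1, row, col, vis =>
    if (row, col) ∈ vis then (0, vis)
    else
      let vis1 := PySem.Set.add vis (row, col)
      match pvCell grid row col with
      | none => (0, vis1)      -- Python raises IndexError here; excluded by Pre_search
      | some h =>
        if h = 9 then (1, vis1)
        else
          pvDirs.foldl (fun acc d =>
            let nr := row + d.1
            let nc := col + d.2
            if nr < 0 ∨ nc < 0 ∨ (grid.length : Int) ≤ nr ∨ pvRowLen grid nr ≤ nc then acc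
            else if (pvCell grid nr nc).getD 0 - h = 1 then  -- in bounds here, so pvCell = some
              let p := searchRec grid f nr nc acc.2
              (acc.1 + p.1, p.2)
            else acc) (0, vis1)

def pvFuelA (grid : List (List Int)) : Nat := (pvAllCells grid).length + 2

def search (row : Int) (col : Int) (grid : List (List Int)) (visited : List (Int × Int)) : Int :=
  (searchRec grid (pvFuelA grid) row col visited).1

-- ===== PORT B =====
-- neighbours pushed by B's inner for-loop, listed in POP order: Python appends
-- (r,c-1),(r,c+1),(r+1,c),(r-1,c) to the end of the list and pops from the end,
-- so the head of this Lean list (stack top) is the LAST appended one.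
def pvNbrs (grid : List (List Int)) (r c h : Int) : List (Int × Int) :=
  ([((-1 : Int), (0 : Int)), (1, 0), (0, 1), (0, -1)]).filterMap fun d =>
    let nr := r + d.1
    let nc := c + d.2
    if 0 ≤ nr ∧ nr < (grid.length : Int) ∧ 0 ≤ nc ∧ nc < pvRowLen grid nr ∧
        (pvCell grid nr nc).getD 0 - h = 1 then some (nr, nc)
    else none

-- B's while-loop over the explicit stack (head = top), fuel-guarded for totality; each pop consumes
-- one unit and the pop count is bounded via the measure pvNu below, so `pvFuelB` is never exhausted.
def loopB (grid : List (List Int)) : Nat → List (Int × Int) → List (Int × Int) → Int → Int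
  | 0, _, _, score => score
  | _ + 1, [], _, score => score
  | f + 1, p :: st, vis, score =>
    if p ∈ vis then loopB grid f st vis score
    else
      let vis1 := PySem.Set.add vis p
      match pvCell grid p.1 p.2 with
      | none => loopB grid f st vis1 score   -- Python raises IndexError here; excluded by Pre_search
      | some h =>
        if h = 9 then loopB grid f st vis1 (score + 1)
        else loopB grid f (pvNbrs grid p.1 p.2 h ++ st) vis1 score

def pvFuelB (grid : List (List Int)) : Nat := 5 * (pvAllCells grid).length + 6

def search_alt (row : Int) (col : Int) (grid : List (List Int)) (visited : List (Int × Int)) : Int :=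
  loopB grid (pvFuelB grid) [(row, col)] visited 0

-- ===== PRECONDITION & SPEC =====
-- Pre_ excludes exactly the inputs on which Python A raises IndexError: the start cell is not in
-- `visited` and grid[row][col] is out of range (B raises there as well).
def Pre_search (row : Int) (col : Int) (grid : List (List Int)) (visited : List (Int × Int)) : Prop :=
  (row, col) ∈ visited ∨ (pvCell grid row col).isSome = true
instance (row : Int) (col : Int) (grid : List (List Int)) (visited : List (Int × Int)) : Decidable (Pre_search row col grid visited) := by unfold Pre_search; infer_instance

def pvWitness_search : Int × Int × List (List Int) × (List (Int × Int)) := (0, 0, [[0, 1]], [(5, 5)])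

def Spec_search (row : Int) (col : Int) (grid : List (List Int)) (visited : List (Int × Int)) (out : Int) : Prop := out = search_alt row col grid visited
instance (row : Int) (col : Int) (grid : List (List Int)) (visited : List (Int × Int)) (out : Int) : Decidable (Spec_search row col grid visited out) := by unfold Spec_search; infer_instance

-- ===== CLAIM (what is proved, stated in full; the proofs are below) =====
def Claim_equal_search : Prop := ∀ (row : Int) (col : Int) (grid : List (List Int)) (visited : List (Int × Int)), Dom_search row col grid visited → Pre_search row col grid visited → Spec_search row col grid visited (search row col grid visited)

-- ===== LEMMAS AND PROOFS =====

-- in-bounds test for a position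
def pvGoodb (grid : List (List Int)) (p : Int × Int) : Bool :=
  decide (0 ≤ p.1 ∧ p.1 < (grid.length : Int) ∧ 0 ≤ p.2 ∧ p.2 < pvRowLen grid p.1)

-- number of in-bounds cells not yet visited
def pvUnv (grid : List (List Int)) (vis : List (Int × Int)) : Nat :=
  ((pvAllCells grid).filter (fun q => !(decide (q ∈ vis)))).length

-- measure bounding the recursion depth of A
def pvMu (grid : List (List Int)) (vis : List (Int × Int)) (r c : Int) : Nat :=
  pvUnv grid vis + (if pvGoodb grid (r, c) = true ∨ (r, c) ∈ vis then 0 else 1)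

def pvBadF (grid : List (List Int)) (vis : List (Int × Int)) : (Int × Int) → Bool :=
  fun q => !(pvGoodb grid q) && !(decide (q ∈ vis))

-- measure bounding the number of pops of B
def pvNu (grid : List (List Int)) (st vis : List (Int × Int)) : Nat :=
  5 * pvUnv grid vis + st.length + 4 * (st.filter (pvBadF grid vis)).length

-- A's DFS at its canonical (always sufficient) fuel
def pvDfs (grid : List (List Int)) (p : Int × Int) (vis : List (Int × Int)) : Int × List (Int × Int) :=
  searchRec grid (pvFuelA grid) p.1 p.2 vis

-- running A's DFS over a list of start cells, threading the visited set and summing scores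
def pvRun (grid : List (List Int)) : List (Int × Int) → List (Int × Int) → Int × List (Int × Int)
  | [], vis => (0, vis)
  | p :: xs, vis =>
    let q := pvDfs grid p vis
    let t := pvRun grid xs q.2
    (q.1 + t.1, t.2)

-- generic list facts --------------------------------------------------------

theorem pvFoldlInv {α β : Type} (l : List α) (f : β → α → β) (I : β → Prop) :
    ∀ b, I b → (∀ s a, I s → a ∈ l → I (f s a)) → I (l.foldl f b) := by
  induction l with
  | nil => intro b hb _; exact hb
  | cons a t ih =>
    intro b hb hs
    exact ih (f b a) (hs b a hb (by simp)) (fun s x hI hx => hs s x hI (by simp [hx]))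

theorem pvFoldlCongrInv {α β : Type} (l : List α) (f g : β → α → β) (I : β → Prop) :
    ∀ b, I b → (∀ s a, I s → a ∈ l → f s a = g s a ∧ I (f s a)) → l.foldl f b = l.foldl g b := by
  induction l with
  | nil => intro b _ _; rfl
  | cons a t ih =>
    intro b hb hs
    have h1 := hs b a hb (by simp)
    simp only [List.foldl_cons, h1.1]
    exact ih (g b a) (h1.1 ▸ h1.2) (fun s x hI hx => hs s x hI (by simp [hx]))

theorem pvFilterLenMono {α : Type} (P Q : α → Bool) :
    ∀ l : List α, (∀ x ∈ l, Q x = true → P x = true) →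
      (l.filter Q).length ≤ (l.filter P).length := by
  intro l
  induction l with
  | nil => intro _; simp
  | cons a t ih =>
    intro h
    have ht := ih (fun x hx => h x (by simp [hx]))
    by_cases hq : Q a = true
    · simp [List.filter_cons, hq, h a (by simp) hq]; omega
    · simp only [List.filter_cons, Bool.not_eq_true] at *
      cases hp : P a <;> simp [hq, hp] <;> omega

theorem pvFilterLenStrict {α : Type} (P Q : α → Bool) :
    ∀ l : List α, (∀ x ∈ l, Q x = true → P x = true) →
      ∀ x0 ∈ l, P x0 = true → Q x0 = false →
      (l.filter Q).length < (l.filter P).length := by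
  intro l
  induction l with
  | nil => intro _ x0 h; simp at h
  | cons a t ih =>
    intro h x0 hx0 hP hQ
    rcases List.mem_cons.mp hx0 with rfl | hmem
    · have := pvFilterLenMono P Q t (fun x hx => h x (by simp [hx]))
      simp [List.filter_cons, hP, hQ]; omega
    · have := ih (fun x hx => h x (by simp [hx])) x0 hmem hP hQ
      by_cases hq : Q a = true
      · simp [List.filter_cons, hq, h a (by simp) hq]; omega
      · simp only [List.filter_cons, Bool.not_eq_true] at *
        cases hp : P a <;> simp [hq, hp] <;> omega

-- visited-set facts ----------------------------------------------------------

theorem pvSubsetAdd {vis : List (Int × Int)} {p : Int × Int} :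
    ∀ x ∈ vis, x ∈ PySem.Set.add vis p := by
  intro x hx; exact (PySem.Set.mem_add vis p x).mpr (Or.inl hx)

theorem pvMemAddSelf (vis : List (Int × Int)) (p : Int × Int) :
    p ∈ PySem.Set.add vis p := (PySem.Set.mem_add vis p p).mpr (Or.inr rfl)

theorem pvUnvMono (grid : List (List Int)) {vis vis' : List (Int × Int)}
    (h : ∀ x ∈ vis, x ∈ vis') : pvUnv grid vis' ≤ pvUnv grid vis := by
  apply pvFilterLenMono
  intro x _ hx
  simp only [Bool.not_eq_true', decide_eq_false_iff_not] at *
  exact fun hm => hx (h x hm)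

theorem pvUnvLeAll (grid : List (List Int)) (vis : List (Int × Int)) :
    pvUnv grid vis ≤ (pvAllCells grid).length := List.length_filter_le _ _

theorem pvMemAllCells (grid : List (List Int)) (p : Int × Int) :
    p ∈ pvAllCells grid ↔ pvGoodb grid p = true := by
  obtain ⟨r, c⟩ := p
  rw [pvAllCells, List.mem_flatMap]
  simp only [pvGoodb, decide_eq_true_eq, List.mem_map, List.mem_range]
  constructor
  · rintro ⟨i, hi, j, hj, hpe⟩
    obtain ⟨rfl, rfl⟩ := Prod.mk.inj hpe
    have hrl : ((pvRowLen grid (i:Int)).toNat : Int) = max (pvRowLen grid (i:Int)) 0 :=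
      Int.toNat_eq_max _ ▸ rfl
    refine ⟨by positivity, by exact_mod_cast hi, by positivity, by omega⟩
  · rintro ⟨h1, h2, h3, h4⟩
    refine ⟨r.toNat, by omega, c.toNat, ?_, ?_⟩
    · have hc : ((r.toNat : Int)) = r := by omega
      rw [hc]; omega
    · have hc : ((r.toNat : Int)) = r := by omega
      have hc2 : ((c.toNat : Int)) = c := by omega
      rw [hc, hc2]

theorem pvUnvAddLt (grid : List (List Int)) {vis : List (Int × Int)} {p : Int × Int}
    (hg : pvGoodb grid p = true) (hp : p ∉ vis) :
    pvUnv grid (PySem.Set.add vis p) < pvUnv grid vis := by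
  apply pvFilterLenStrict
  · intro x _ hx
    simp only [Bool.not_eq_true', decide_eq_false_iff_not] at *
    exact fun hm => hx (pvSubsetAdd x hm)
  · exact (pvMemAllCells grid p).mpr hg
  · simp [hp]
  · simp [pvMemAddSelf]

-- A-side: monotonicity and fuel stability ------------------------------------

theorem pvSearchRecMono (grid : List (List Int)) :
    ∀ (f : Nat) (r c : Int) (vis : List (Int × Int)),
      ∀ x ∈ vis, x ∈ (searchRec grid f r c vis).2 := by
  intro f
  induction f with
  | zero => intro r c vis x hx; exact hx
  | succ f ih =>
    intro r c vis x hx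
    rw [searchRec]
    by_cases hmem : (r, c) ∈ vis
    · simp [hmem, hx]
    · simp only [if_neg hmem]
      cases hc : pvCell grid r c with
      | none => exact pvSubsetAdd x hx
      | some h =>
        by_cases h9 : h = 9
        · simp [h9, pvSubsetAdd x hx]
        · simp only [if_neg h9]
          refine pvFoldlInv pvDirs _ (fun (s : Int × List (Int × Int)) => x ∈ s.2) _
            (pvSubsetAdd x hx) ?_
          intro s d hI _
          dsimp only
          split
          · exact hI
          · split
            · exact ih _ _ _ x hI
            · exact hI

theorem pvSearchRecStable (grid : List (List Int)) :
    ∀ (f g : Nat) (r c : Int) (vis : List (Int × Int)),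
      pvMu grid vis r c + 1 ≤ f → pvMu grid vis r c + 1 ≤ g →
      searchRec grid f r c vis = searchRec grid g r c vis := by
  intro f
  induction f using Nat.strong_induction_on with
  | _ f IH =>
    intro g r c vis hf hg
    match f, g with
    | f' + 1, g' + 1 =>
      rw [searchRec, searchRec]
      by_cases hmem : (r, c) ∈ vis
      · simp [hmem]
      · simp only [if_neg hmem]
        cases hc : pvCell grid r c with
        | none => rfl
        | some h =>
          by_cases h9 : h = 9
          · simp [h9]
          · simp only [if_neg h9]
            -- the two folds differ only in the fuel of the recursive calls
            refine pvFoldlCongrInv pvDirs _ _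
              (fun (s : Int × List (Int × Int)) => ∀ x ∈ PySem.Set.add vis (r, c), x ∈ s.2) _
              (fun x hx => hx) ?_
            intro s d hI _
            dsimp only
            split
            · exact ⟨rfl, hI⟩
            · split
              · -- recursive call: re-fuel via the induction hypothesis
                have hgoodn : pvGoodb grid (r + d.1, c + d.2) = true := by
                  rename_i hskip _
                  simp only [pvGoodb, decide_eq_true_eq]
                  exact ⟨by omega, by omega, by omega, by omega⟩
                have hmun : pvMu grid s.2 (r + d.1) (c + d.2) = pvUnv grid s.2 := by
                  unfold pvMu
                  rw [if_pos (Or.inl hgoodn)]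
                  omega
                have hsub : pvUnv grid s.2 ≤ pvUnv grid (PySem.Set.add vis (r, c)) :=
                  pvUnvMono grid hI
                have hbound : pvUnv grid s.2 + 1 ≤ min f' g' := by
                  by_cases hgood : pvGoodb grid (r, c) = true
                  · have h1 : pvUnv grid (PySem.Set.add vis (r, c)) < pvUnv grid vis :=
                      pvUnvAddLt grid hgood hmem
                    have h2 : pvMu grid vis r c = pvUnv grid vis := by
                      unfold pvMu; rw [if_pos (Or.inl hgood)]; omega
                    omega
                  · have h1 : pvUnv grid (PySem.Set.add vis (r, c)) ≤ pvUnv grid vis :=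
                      pvUnvMono grid pvSubsetAdd
                    have h2 : pvMu grid vis r c = pvUnv grid vis + 1 := by
                      unfold pvMu
                      rw [if_neg]
                      rintro (hg' | hm') <;> [exact hgood hg'; exact hmem hm']
                    omega
                have heq : searchRec grid f' (r + d.1) (c + d.2) s.2 =
                    searchRec grid g' (r + d.1) (c + d.2) s.2 := by
                  apply IH f' (by omega) g' _ _ s.2 (by omega) (by omega)
                rw [heq]
                refine ⟨rfl, ?_⟩
                intro x hx
                exact pvSearchRecMono grid g' _ _ s.2 x (hI x hx)
              · exact ⟨rfl, hI⟩

theorem pvSearchRecCanon (grid : List (List Int)) {f : Nat} {r c : Int}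
    {vis : List (Int × Int)} (hf : pvMu grid vis r c + 1 ≤ f) :
    searchRec grid f r c vis = pvDfs grid (r, c) vis := by
  apply pvSearchRecStable grid f (pvFuelA grid) r c vis hf
  have h1 := pvUnvLeAll grid vis
  unfold pvMu pvFuelA
  split <;> omega

-- B-side measure facts -------------------------------------------------------

theorem pvNbrsGood (grid : List (List Int)) (r c h : Int) :
    ∀ q ∈ pvNbrs grid r c h, pvGoodb grid q = true := by
  intro q hq
  simp only [pvNbrs, List.mem_filterMap] at hq
  obtain ⟨d, _, hd⟩ := hq
  by_cases hc : 0 ≤ r + d.1 ∧ r + d.1 < (grid.length : Int) ∧ 0 ≤ c + d.2 ∧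
      c + d.2 < pvRowLen grid (r + d.1) ∧ (pvCell grid (r + d.1) (c + d.2)).getD 0 - h = 1
  · simp only [hc, if_pos] at hd
    cases hd
    simp only [pvGoodb, decide_eq_true_eq]
    exact ⟨hc.1, hc.2.1, hc.2.2.1, hc.2.2.2.1⟩
  · simp [hc] at hd

theorem pvNbrsLen (grid : List (List Int)) (r c h : Int) :
    (pvNbrs grid r c h).length ≤ 4 := by
  have := List.length_filterMap_le (fun d : Int × Int =>
    (if 0 ≤ r + d.1 ∧ r + d.1 < (grid.length : Int) ∧ 0 ≤ c + d.2 ∧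
        c + d.2 < pvRowLen grid (r + d.1) ∧ (pvCell grid (r + d.1) (c + d.2)).getD 0 - h = 1
     then some (r + d.1, c + d.2) else none))
    [((-1 : Int), (0 : Int)), (1, 0), (0, 1), (0, -1)]
  simpa [pvNbrs] using this

theorem pvBadFilterMono (grid : List (List Int)) (st : List (Int × Int))
    {vis vis' : List (Int × Int)} (h : ∀ x ∈ vis, x ∈ vis') :
    (st.filter (pvBadF grid vis')).length ≤ (st.filter (pvBadF grid vis)).length := by
  apply pvFilterLenMono
  intro x _ hx
  simp only [pvBadF, Bool.and_eq_true, Bool.not_eq_true', decide_eq_false_iff_not,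
    Bool.not_eq_true] at *
  exact ⟨hx.1, fun hm => hx.2 (h x hm)⟩

theorem pvNuMonoVis (grid : List (List Int)) (st : List (Int × Int))
    {vis vis' : List (Int × Int)} (h : ∀ x ∈ vis, x ∈ vis') :
    pvNu grid st vis' ≤ pvNu grid st vis := by
  have h1 := pvUnvMono grid h
  have h2 := pvBadFilterMono grid st h
  unfold pvNu; omega

theorem pvFilterConsLe {α : Type} (pred : α → Bool) (p : α) (st : List α) :
    (st.filter pred).length ≤ ((p :: st).filter pred).length := by
  simp only [List.filter_cons]; split <;> simp

theorem pvNuConsGe (grid : List (List Int)) (p : Int × Int) (st vis : List (Int × Int)) :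
    pvNu grid st vis + 1 ≤ pvNu grid (p :: st) vis := by
  have := pvFilterConsLe (pvBadF grid vis) p st
  unfold pvNu
  simp only [List.length_cons]
  omega

theorem pvNuAppendLe (grid : List (List Int)) (a st vis : List (Int × Int)) :
    pvNu grid st vis ≤ pvNu grid (a ++ st) vis := by
  unfold pvNu
  simp only [List.length_append, List.filter_append]
  omega

-- popping an unvisited cell and pushing its neighbours strictly decreases the measure
theorem pvNuPush (grid : List (List Int)) (p : Int × Int) (h : Int)
    (st vis : List (Int × Int)) (hmem : p ∉ vis) :
    pvNu grid (pvNbrs grid p.1 p.2 h ++ st) (PySem.Set.add vis p) + 1 ≤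
      pvNu grid (p :: st) vis := by
  set vis1 := PySem.Set.add vis p with hv1
  have hlen : (pvNbrs grid p.1 p.2 h).length ≤ 4 := pvNbrsLen grid p.1 p.2 h
  have hnbrs : ((pvNbrs grid p.1 p.2 h).filter (pvBadF grid vis1)).length = 0 := by
    rw [List.length_eq_zero_iff, List.filter_eq_nil_iff]
    intro q hq
    have := pvNbrsGood grid p.1 p.2 h q hq
    simp [pvBadF, this]
  have hfst : ((st.filter (pvBadF grid vis1))).length ≤ ((st.filter (pvBadF grid vis))).length :=
    pvBadFilterMono grid st pvSubsetAdd
  have hfc := pvFilterConsLe (pvBadF grid vis) p st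
  by_cases hgood : pvGoodb grid p = true
  · have hu : pvUnv grid vis1 < pvUnv grid vis := pvUnvAddLt grid hgood hmem
    unfold pvNu
    simp only [List.length_append, List.filter_append, List.length_cons]
    omega
  · have hu : pvUnv grid vis1 ≤ pvUnv grid vis := pvUnvMono grid pvSubsetAdd
    have hbadp : pvBadF grid vis p = true := by
      simp [pvBadF, hgood, hmem]
    have hfe : (((p :: st).filter (pvBadF grid vis))).length =
        ((st.filter (pvBadF grid vis))).length + 1 := by
      simp [List.filter_cons, hbadp]
    unfold pvNu
    simp only [List.length_append, List.filter_append, List.length_cons]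
    omega

-- loopB: empty stack returns the score, any fuel
theorem pvLoopBNil (grid : List (List Int)) (f : Nat) (vis : List (Int × Int)) (s : Int) :
    loopB grid f [] vis s = s := by
  cases f <;> rfl

theorem pvLoopBStable (grid : List (List Int)) :
    ∀ (f g : Nat) (st vis : List (Int × Int)) (score : Int),
      pvNu grid st vis + 1 ≤ f → pvNu grid st vis + 1 ≤ g →
      loopB grid f st vis score = loopB grid g st vis score := by
  intro f
  induction f using Nat.strong_induction_on with
  | _ f IH =>
    intro g st vis score hf hg
    cases st with
    | nil => rw [pvLoopBNil, pvLoopBNil]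
    | cons p st =>
      obtain ⟨f', rfl⟩ : ∃ f', f = f' + 1 := ⟨f - 1, by omega⟩
      obtain ⟨g', rfl⟩ : ∃ g', g = g' + 1 := ⟨g - 1, by omega⟩
      have hcons := pvNuConsGe grid p st vis
      rw [loopB, loopB]
      by_cases hmem : p ∈ vis
      · rw [if_pos hmem, if_pos hmem]
        exact IH f' (by omega) g' st vis score (by omega) (by omega)
      · rw [if_neg hmem, if_neg hmem]
        have hmono := pvNuMonoVis grid st (pvSubsetAdd (vis := vis) (p := p))
        cases hcell : pvCell grid p.1 p.2 with
        | none => exact IH f' (by omega) g' st _ score (by omega) (by omega)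
        | some h =>
          dsimp only
          by_cases h9 : h = 9
          · rw [if_pos h9, if_pos h9]
            exact IH f' (by omega) g' st _ _ (by omega) (by omega)
          · rw [if_neg h9, if_neg h9]
            have hpush := pvNuPush grid p h st vis hmem
            exact IH f' (by omega) g' _ _ score (by omega) (by omega)

-- run facts ------------------------------------------------------------------

theorem pvRunMono (grid : List (List Int)) :
    ∀ (xs vis : List (Int × Int)), ∀ x ∈ vis, x ∈ (pvRun grid xs vis).2 := by
  intro xs
  induction xs with
  | nil => intro vis x hx; exact hx
  | cons p t ih =>
    intro vis x hx
    exact ih _ x (pvSearchRecMono grid _ _ _ _ x hx)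

-- unfolding pvDfs one step (pvFuelA ≥ 1)
theorem pvDfsVisited (grid : List (List Int)) {p : Int × Int} {vis : List (Int × Int)}
    (h : p ∈ vis) : pvDfs grid p vis = (0, vis) := by
  unfold pvDfs pvFuelA
  rw [searchRec]
  simp [h]

theorem pvDfsNone (grid : List (List Int)) {p : Int × Int} {vis : List (Int × Int)}
    (h : p ∉ vis) (hc : pvCell grid p.1 p.2 = none) :
    pvDfs grid p vis = (0, PySem.Set.add vis p) := by
  unfold pvDfs pvFuelA
  rw [searchRec]
  simp [h, hc]

theorem pvDfsNine (grid : List (List Int)) {p : Int × Int} {vis : List (Int × Int)}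
    (h : p ∉ vis) {hv : Int} (hc : pvCell grid p.1 p.2 = some hv) (h9 : hv = 9) :
    pvDfs grid p vis = (1, PySem.Set.add vis p) := by
  unfold pvDfs pvFuelA
  rw [searchRec]
  simp [h, hc, h9]

theorem pvFoldRun (grid : List (List Int)) (r c h : Int) :
    ∀ (ds : List (Int × Int)) (s : Int × List (Int × Int)),
      ds.foldl (fun acc d =>
          let nr := r + d.1
          let nc := c + d.2
          if nr < 0 ∨ nc < 0 ∨ (grid.length : Int) ≤ nr ∨ pvRowLen grid nr ≤ nc then acc
          else if (pvCell grid nr nc).getD 0 - h = 1 then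
            let p := searchRec grid ((pvAllCells grid).length + 1) nr nc acc.2
            (acc.1 + p.1, p.2)
          else acc) s
      = (s.1 + (pvRun grid (ds.filterMap fun d =>
            let nr := r + d.1
            let nc := c + d.2
            if 0 ≤ nr ∧ nr < (grid.length : Int) ∧ 0 ≤ nc ∧ nc < pvRowLen grid nr ∧
                (pvCell grid nr nc).getD 0 - h = 1 then some (nr, nc) else none) s.2).1,
         (pvRun grid (ds.filterMap fun d =>
            let nr := r + d.1
            let nc := c + d.2
            if 0 ≤ nr ∧ nr < (grid.length : Int) ∧ 0 ≤ nc ∧ nc < pvRowLen grid nr ∧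
                (pvCell grid nr nc).getD 0 - h = 1 then some (nr, nc) else none) s.2).2) := by
  intro ds
  induction ds with
  | nil => intro s; simp [pvRun]
  | cons d rest ih =>
    intro s
    simp only [List.foldl_cons, List.filterMap_cons]
    by_cases h1 : 0 ≤ r + d.1 ∧ r + d.1 < (grid.length : Int) ∧ 0 ≤ c + d.2 ∧
        c + d.2 < pvRowLen grid (r + d.1) ∧ (pvCell grid (r + d.1) (c + d.2)).getD 0 - h = 1
    · rw [if_neg (by omega), if_pos h1.2.2.2.2, if_pos h1]
      have hgood : pvGoodb grid (r + d.1, c + d.2) = true := by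
        simp only [pvGoodb, decide_eq_true_eq]
        exact ⟨h1.1, h1.2.1, h1.2.2.1, h1.2.2.2.1⟩
      have hcanon : searchRec grid ((pvAllCells grid).length + 1) (r + d.1) (c + d.2) s.2
          = pvDfs grid (r + d.1, c + d.2) s.2 := by
        apply pvSearchRecCanon
        have h2 : pvMu grid s.2 (r + d.1) (c + d.2) = pvUnv grid s.2 := by
          unfold pvMu; rw [if_pos (Or.inl hgood)]; omega
        have := pvUnvLeAll grid s.2
        omega
      rw [hcanon, ih]
      simp only [pvRun, Prod.mk.injEq]
      exact ⟨by ring, trivial⟩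
    · rw [if_neg h1]
      by_cases hskip : r + d.1 < 0 ∨ c + d.2 < 0 ∨ (grid.length : Int) ≤ r + d.1 ∨
          pvRowLen grid (r + d.1) ≤ c + d.2
      · rw [if_pos hskip]; exact ih s
      · rw [if_neg hskip, if_neg (fun hval =>
          h1 ⟨by omega, by omega, by omega, by omega, hval⟩)]
        exact ih s

theorem pvDfsStep (grid : List (List Int)) {p : Int × Int} {vis : List (Int × Int)}
    (h : p ∉ vis) {hv : Int} (hc : pvCell grid p.1 p.2 = some hv) (h9 : hv ≠ 9) :
    pvDfs grid p vis = pvRun grid (pvNbrs grid p.1 p.2 hv) (PySem.Set.add vis p) := by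
  unfold pvDfs pvFuelA
  rw [searchRec]
  simp only [Prod.mk.eta, if_neg h, hc, if_neg h9]
  rw [pvFoldRun grid p.1 p.2 hv pvDirs (0, PySem.Set.add vis p)]
  show (0 + (pvRun grid (pvNbrs grid p.1 p.2 hv) (PySem.Set.add vis p)).1,
        (pvRun grid (pvNbrs grid p.1 p.2 hv) (PySem.Set.add vis p)).2) = _
  simp

-- the bridge: B's stack loop = folding A's DFS over the stack -----------------

theorem pvBridge (grid : List (List Int)) :
    ∀ (f : Nat) (xs st vis : List (Int × Int)) (score : Int) (g : Nat),
      pvNu grid (xs ++ st) vis + 1 ≤ f →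
      pvNu grid st (pvRun grid xs vis).2 + 1 ≤ g →
      loopB grid f (xs ++ st) vis score =
        loopB grid g st (pvRun grid xs vis).2 (score + (pvRun grid xs vis).1) := by
  intro f
  induction f using Nat.strong_induction_on with
  | _ f IH =>
    intro xs st vis score g hf hg
    cases xs with
    | nil =>
      simp only [List.nil_append] at hf ⊢
      simp only [pvRun] at hg ⊢
      rw [add_zero]
      exact pvLoopBStable grid f g st vis score hf hg
    | cons p rest =>
      rw [List.cons_append] at hf ⊢
      obtain ⟨f', rfl⟩ : ∃ f', f = f' + 1 := ⟨f - 1, by omega⟩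
      have hcons := pvNuConsGe grid p (rest ++ st) vis
      rw [loopB]
      by_cases hmem : p ∈ vis
      · rw [if_pos hmem]
        have hrun : pvRun grid (p :: rest) vis = pvRun grid rest vis := by
          simp [pvRun, pvDfsVisited grid hmem]
        rw [hrun] at hg ⊢
        exact IH f' (by omega) rest st vis score g (by omega) hg
      · rw [if_neg hmem]
        have hmono := pvNuMonoVis grid (rest ++ st)
          (pvSubsetAdd (vis := vis) (p := p))
        cases hcell : pvCell grid p.1 p.2 with
        | none =>
          have hrun : pvRun grid (p :: rest) vis =
              pvRun grid rest (PySem.Set.add vis p) := by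
            simp [pvRun, pvDfsNone grid hmem hcell]
          rw [hrun] at hg ⊢
          exact IH f' (by omega) rest st _ score g (by omega) hg
        | some h =>
          dsimp only
          by_cases h9 : h = 9
          · rw [if_pos h9]
            have hrun : pvRun grid (p :: rest) vis =
                (1 + (pvRun grid rest (PySem.Set.add vis p)).1,
                 (pvRun grid rest (PySem.Set.add vis p)).2) := by
              simp [pvRun, pvDfsNine grid hmem hcell h9]
            rw [hrun] at hg ⊢
            rw [IH f' (by omega) rest st _ (score + 1) g (by omega) hg]
            congr 1
            ring
          · rw [if_neg h9]
            have hstep := pvDfsStep grid hmem hcell h9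
            have hpush := pvNuPush grid p h (rest ++ st) vis hmem
            have hmono2 : pvNu grid (rest ++ st)
                (pvRun grid (pvNbrs grid p.1 p.2 h) (PySem.Set.add vis p)).2 ≤
                pvNu grid (rest ++ st) (PySem.Set.add vis p) :=
              pvNuMonoVis grid (rest ++ st)
                (pvRunMono grid (pvNbrs grid p.1 p.2 h) (PySem.Set.add vis p))
            have happ := pvNuAppendLe grid (pvNbrs grid p.1 p.2 h) (rest ++ st)
              (PySem.Set.add vis p)
            rw [IH f' (by omega) (pvNbrs grid p.1 p.2 h) (rest ++ st)
              (PySem.Set.add vis p) score f' (by omega) (by omega)]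
            have hrun : pvRun grid (p :: rest) vis =
                ((pvRun grid (pvNbrs grid p.1 p.2 h) (PySem.Set.add vis p)).1 +
                  (pvRun grid rest
                    (pvRun grid (pvNbrs grid p.1 p.2 h) (PySem.Set.add vis p)).2).1,
                 (pvRun grid rest
                    (pvRun grid (pvNbrs grid p.1 p.2 h) (PySem.Set.add vis p)).2).2) := by
              simp [pvRun, hstep]
            rw [hrun] at hg ⊢
            rw [IH f' (by omega) rest st _
              (score + (pvRun grid (pvNbrs grid p.1 p.2 h) (PySem.Set.add vis p)).1) g
              (by omega) hg]
            congr 1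
            ring

-- ===== VERDICT (by name: the statement is the Claim_ definition above) =====
theorem search_spec : Claim_equal_search := by
  intro row col grid visited _ _
  unfold Spec_search search search_alt
  have hL := pvUnvLeAll grid visited
  have hfil : (([((row : Int), (col : Int))]).filter (pvBadF grid visited)).length ≤ 1 := by
    simpa using List.length_filter_le (pvBadF grid visited) [(row, col)]
  have h1 : pvNu grid ([(row, col)] ++ []) visited + 1 ≤ pvFuelB grid := by
    simp only [List.append_nil]
    unfold pvNu pvFuelB
    simp only [List.length_cons, List.length_nil]
    omega
  have h2 : pvNu grid [] (pvRun grid [(row, col)] visited).2 + 1 ≤ 5 * (pvAllCells grid).length + 1 := by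
    have := pvUnvLeAll grid (pvRun grid [(row, col)] visited).2
    unfold pvNu
    simp only [List.length_nil, List.filter_nil]
    omega
  have hb := pvBridge grid (pvFuelB grid) [(row, col)] [] visited 0
    (5 * (pvAllCells grid).length + 1) h1 h2
  rw [List.append_nil] at hb
  rw [hb, pvLoopBNil]
  show (searchRec grid (pvFuelA grid) row col visited).1 = _
  have : pvRun grid [(row, col)] visited =
      ((pvDfs grid (row, col) visited).1 + 0, (pvRun grid [] (pvDfs grid (row, col) visited).2).2) := rfl
  rw [this]
  show (pvDfs grid (row, col) visited).1 = 0 + ((pvDfs grid (row, col) visited).1 + 0)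
  omega
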